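-- pv_equiv track=rewrite | github.com/pypi-data/pypi-mirror-131 | packages/ryu-ptdn/ryu_ptdn-4.34.0.dev3373-py3-none-any.whl/ryu/lib/addrconv_ptdn.py | ipv6_tokens_handler
-- ===== SOURCE A (Python) =====
-- def ipv6_tokens_handler(tokens):
--     new_tokens = []
--
--     positions = []
--     start_index = None
--     num_tokens = 0
--
--     #   Discover all runs of zeros.
--     for idx, token in enumerate(tokens):
--         if token == '0':
--             if start_index is None:
--                 start_index = idx
--             num_tokens += 1
--         else:
--             if num_tokens > 1:
--                 positions.append((num_tokens, start_index))
--             start_index = None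
--             num_tokens = 0
--
--         new_tokens.append(token)
--
--     #   Store any position not saved before loop exit.
--     if num_tokens > 1:
--         positions.append((num_tokens, start_index))
--
--     #   Replace first longest run with an empty string.
--     if len(positions) != 0:
--         #   Locate longest, left-most run of zeros.
--         positions.sort(key=lambda x: x[1])
--         best_position = positions[0]
--         for position in positions:
--             if position[0] > best_position[0]:
--                 best_position = position
--         #   Replace chosen zero run.
--         (length, start_idx) = best_position
--         new_tokens = new_tokens[0:start_idx] + [''] + new_tokens[start_idx + length:]
--
--         #   Add start and end blanks so join creates '::'.
--         if new_tokens[0] == '':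
--             new_tokens.insert(0, '')
--
--         if new_tokens[-1] == '':
--             new_tokens.append('')
--
--     return new_tokens
-- ===== SOURCE B (Python) =====
-- def ipv6_tokens_handler(tokens):
--     best_len = 0
--     best_start = 0
--     run_len = 0
--     run_start = 0
--     for idx, token in enumerate(tokens):
--         if token == '0':
--             if run_len == 0:
--                 run_start = idx
--             run_len += 1
--         else:
--             if run_len > 1 and run_len > best_len:
--                 best_len = run_len
--                 best_start = run_start
--             run_len = 0
--     if run_len > 1 and run_len > best_len:
--         best_len = run_len
--         best_start = run_start
--     if best_len == 0:
--         return list(tokens)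
--     out = tokens[:best_start] + [''] + tokens[best_start + best_len:]
--     if out[0] == '':
--         out = [''] + out
--     if out[-1] == '':
--         out = out + ['']
--     return out
-- ===== Notes on version B (the rewrite author's own statement) =====
-- stated objective: simpler
-- what changed: Replaced A's positions-list accumulation plus sort plus selection loop with a single pass that tracks the current zero-run and the leftmost-longest run so far, then splices once.
import Mathlib
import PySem

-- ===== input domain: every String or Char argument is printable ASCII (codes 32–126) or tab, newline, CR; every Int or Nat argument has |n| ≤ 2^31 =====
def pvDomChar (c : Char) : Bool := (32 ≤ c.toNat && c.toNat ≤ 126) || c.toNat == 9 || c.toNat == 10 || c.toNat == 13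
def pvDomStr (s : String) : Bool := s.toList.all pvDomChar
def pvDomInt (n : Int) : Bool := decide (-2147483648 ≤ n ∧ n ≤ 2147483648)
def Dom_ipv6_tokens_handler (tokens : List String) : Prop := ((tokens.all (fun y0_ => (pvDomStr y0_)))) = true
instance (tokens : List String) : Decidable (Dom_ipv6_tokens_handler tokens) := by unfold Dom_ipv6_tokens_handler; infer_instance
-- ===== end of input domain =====

-- B replaces A's positions-list + sort + selection loop with one pass that tracks the
-- leftmost-longest zero run (objective: simpler).

-- ===== PORT A =====
-- selection step of A's 'for position in positions' loop
def pvASel (b p : Int × Int) : Int × Int := if p.1 > b.1 then p else b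

-- A's first loop: accumulates new_tokens, positions, start_index, num_tokens.
-- start_index is None exactly when num_tokens = 0; the '.getD 0' in the append is never
-- reached with none (Python appends only when num_tokens > 1, where start_index is set).
def pvALoop (ts : List String) (idx : Int) (newT : List String)
    (pos : List (Int × Int)) (si : Option Int) (nt : Int) :
    List String × List (Int × Int) × Option Int × Int :=
  match ts with
  | [] => (newT, pos, si, nt)
  | t :: rest =>
    if t = "0" then
      pvALoop rest (idx + 1) (newT ++ [t]) pos
        (match si with | none => some idx | some s => some s) (nt + 1)
    else
      pvALoop rest (idx + 1) (newT ++ [t])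
        (if nt > 1 then pos ++ [(nt, si.getD 0)] else pos) none 0

-- everything after A's first loop and final append: sort, select, splice, edge blanks
def pvAFinish (newT : List String) (pos : List (Int × Int)) : List String :=
  if pos.length ≠ 0 then
    match PySem.List.sorted pos (fun x => x.2) false with
    | [] => newT   -- unreachable: positions is nonempty here
    | p0 :: ps =>
      let best := (p0 :: ps).foldl pvASel p0
      let newT2 := PySem.List.slice newT (some 0) (some best.2) ++ [""] ++
                   PySem.List.slice newT (some (best.2 + best.1)) none
      -- new_tokens[0] / new_tokens[-1]: the list is nonempty here, head?/getLast? are exact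
      let newT3 := if newT2.head? = some "" then "" :: newT2 else newT2
      if newT3.getLast? = some "" then newT3 ++ [""] else newT3
  else newT

def ipv6_tokens_handler (tokens : List String) : List String :=
  match pvALoop tokens 0 [] [] none 0 with
  | (newT, pos, si, nt) =>
    pvAFinish newT (if nt > 1 then pos ++ [(nt, si.getD 0)] else pos)

-- ===== PORT B =====
-- B's single pass, state (best_len, best_start, run_len, run_start)
def pvBLoop (ts : List String) (idx bl bs rl rs : Int) : Int × Int × Int × Int :=
  match ts with
  | [] => (bl, bs, rl, rs)
  | t :: rest =>
    if t = "0" then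
      pvBLoop rest (idx + 1) bl bs (rl + 1) (if rl = 0 then idx else rs)
    else
      if rl > 1 ∧ rl > bl then pvBLoop rest (idx + 1) rl rs 0 rs
      else pvBLoop rest (idx + 1) bl bs 0 rs

-- B after the loop and final flush: splice once, then edge blanks
def pvBFinish (tokens : List String) (b : Int × Int) : List String :=
  if b.1 = 0 then tokens
  else
    let out := PySem.List.slice tokens none (some b.2) ++ [""] ++
               PySem.List.slice tokens (some (b.2 + b.1)) none
    let out2 := if out.head? = some "" then "" :: out else out
    if out2.getLast? = some "" then out2 ++ [""] else out2

def ipv6_tokens_handler_alt (tokens : List String) : List String :=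
  match pvBLoop tokens 0 0 0 0 0 with
  | (bl, bs, rl, rs) =>
    pvBFinish tokens (if rl > 1 ∧ rl > bl then (rl, rs) else (bl, bs))

-- ===== PRECONDITION & SPEC =====
def Spec_ipv6_tokens_handler (tokens : List String) (out : List String) : Prop := out = ipv6_tokens_handler_alt tokens
instance (tokens : List String) (out : List String) : Decidable (Spec_ipv6_tokens_handler tokens out) := by unfold Spec_ipv6_tokens_handler; infer_instance

-- ===== CLAIM (what is proved, stated in full; the proofs are below) =====
def Claim_equal_ipv6_tokens_handler : Prop := ∀ (tokens : List String), Dom_ipv6_tokens_handler tokens → Spec_ipv6_tokens_handler tokens (ipv6_tokens_handler tokens)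

-- ===== LEMMAS AND PROOFS =====

theorem pvASel_fst_le (b p : Int × Int) : b.1 ≤ (pvASel b p).1 := by
  unfold pvASel; split_ifs with h <;> omega

theorem foldl_pvASel_fst_le (ps : List (Int × Int)) (b : Int × Int) :
    b.1 ≤ (ps.foldl pvASel b).1 := by
  induction ps generalizing b with
  | nil => simp
  | cons p rest ih => exact le_trans (pvASel_fst_le b p) (ih _)

theorem foldl_pvASel_self (p0 : Int × Int) (ps : List (Int × Int)) :
    (p0 :: ps).foldl pvASel p0 = ps.foldl pvASel p0 := by
  simp [List.foldl, pvASel]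

theorem foldl_pvASel_zero (p0 : Int × Int) (ps : List (Int × Int)) (h : 0 < p0.1) :
    (p0 :: ps).foldl pvASel (0, 0) = ps.foldl pvASel p0 := by
  have h1 : pvASel (0, 0) p0 = p0 := by
    unfold pvASel; rw [if_pos]; exact h
  simp [List.foldl, h1]

-- appending a flushed run to positions = B's conditional best update
theorem flush_corr (pos : List (Int × Int)) (bl bs nt rs : Int)
    (hb : (bl, bs) = pos.foldl pvASel (0, 0)) (hnt : nt > 1) :
    (if nt > 1 ∧ nt > bl then (nt, rs) else (bl, bs)) =
      (pos ++ [(nt, rs)]).foldl pvASel (0, 0) := by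
  rw [List.foldl_append, ← hb]
  unfold pvASel
  by_cases h : nt > bl <;> simp [h, hnt]

-- A's and B's loops run in lock-step
theorem loop_corr (ts : List String) (idx : Int) (newT : List String)
    (pos : List (Int × Int)) (si : Option Int) (nt : Int) (bl bs rs : Int)
    (h0 : 0 ≤ nt)
    (h1 : 0 < nt → si = some rs ∧ rs = idx - nt)
    (h2 : nt = 0 → si = none)
    (hpos : ∀ p ∈ pos, 1 < p.1 ∧ p.2 + p.1 ≤ idx - nt)
    (hpw : List.Pairwise (fun a b => a.2 < b.2) pos)
    (hb : (bl, bs) = pos.foldl pvASel (0, 0)) :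
    ∃ pos' si' nt' bl' bs' rs',
      pvALoop ts idx newT pos si nt = (newT ++ ts, pos', si', nt') ∧
      pvBLoop ts idx bl bs nt rs = (bl', bs', nt', rs') ∧
      0 ≤ nt' ∧
      (0 < nt' → si' = some rs' ∧ rs' = (idx + ts.length) - nt') ∧
      (nt' = 0 → si' = none) ∧
      (∀ p ∈ pos', 1 < p.1 ∧ p.2 + p.1 ≤ (idx + ts.length) - nt') ∧
      List.Pairwise (fun a b => a.2 < b.2) pos' ∧
      (bl', bs') = pos'.foldl pvASel (0, 0) := by
  induction ts generalizing idx newT pos si nt bl bs rs with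
  | nil =>
    refine ⟨pos, si, nt, bl, bs, rs, by simp [pvALoop], by simp [pvBLoop], h0, ?_, h2, ?_, hpw, hb⟩
    · intro h; obtain ⟨x, y⟩ := h1 h; exact ⟨x, by simpa using y⟩
    · intro p hp; obtain ⟨x, y⟩ := hpos p hp; exact ⟨x, by simpa using y⟩
  | cons t rest ih =>
    by_cases ht : t = "0"
    · -- zero token: extend the current run
      obtain ⟨pos', si', nt', bl', bs', rsf, hA, hB, hh0, hh1, hh2, hhpos, hhpw, hhb⟩ :=
        ih (idx + 1) (newT ++ [t]) pos (some (if nt = 0 then idx else rs)) (nt + 1)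
          bl bs (if nt = 0 then idx else rs) (by omega)
          (by intro _
              refine ⟨rfl, ?_⟩
              by_cases hnt : nt = 0
              · simp [hnt]
              · obtain ⟨_, h⟩ := h1 (by omega)
                simp only [if_neg hnt]; omega)
          (by omega)
          (by intro p hp; obtain ⟨x, y⟩ := hpos p hp; exact ⟨x, by omega⟩)
          hpw hb
      have hstepA : pvALoop (t :: rest) idx newT pos si nt =
          pvALoop rest (idx + 1) (newT ++ [t]) pos (some (if nt = 0 then idx else rs)) (nt + 1) := by
        rcases hsi : si with _ | s
        · have hnt : nt = 0 := by
            by_contra h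
            obtain ⟨hx, _⟩ := h1 (by omega)
            rw [hsi] at hx; simp at hx
          simp [pvALoop, ht, hnt]
        · have hnt : nt ≠ 0 := by
            intro h; have := h2 h; rw [hsi] at this; simp at this
          obtain ⟨hx, _⟩ := h1 (by omega)
          rw [hsi] at hx
          simp only [Option.some.injEq] at hx
          simp [pvALoop, ht, hnt, hx]
      have hstepB : pvBLoop (t :: rest) idx bl bs nt rs =
          pvBLoop rest (idx + 1) bl bs (nt + 1) (if nt = 0 then idx else rs) := by
        simp [pvBLoop, ht]
      refine ⟨pos', si', nt', bl', bs', rsf, ?_, ?_, hh0, ?_, hh2, ?_, hhpw, hhb⟩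
      · rw [hstepA, hA]; simp
      · rw [hstepB, hB]
      · intro h; obtain ⟨x, y⟩ := hh1 h
        refine ⟨x, ?_⟩
        simp only [List.length_cons]
        push_cast
        omega
      · intro p hp; obtain ⟨x, y⟩ := hhpos p hp
        refine ⟨x, ?_⟩
        simp only [List.length_cons]
        push_cast
        omega
    · -- non-zero token
      by_cases hnt : nt > 1
      · -- flush the run
        obtain ⟨hsi, hrs⟩ := h1 (by omega)
        obtain ⟨pos', si', nt', bl', bs', rsf, hA, hB, hh0, hh1, hh2, hhpos, hhpw, hhb⟩ :=
          ih (idx + 1) (newT ++ [t]) (pos ++ [(nt, rs)]) none 0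
            (if nt > bl then nt else bl) (if nt > bl then rs else bs) rs (by omega)
            (by intro h; omega)
            (by intro _; rfl)
            (by intro p hp
                rcases List.mem_append.mp hp with h | h
                · obtain ⟨x, y⟩ := hpos p h; exact ⟨x, by omega⟩
                · simp only [List.mem_singleton] at h; subst h
                  exact ⟨by simpa using hnt, by simp; omega⟩)
            (by rw [List.pairwise_append]
                refine ⟨hpw, List.pairwise_singleton _ _, ?_⟩
                intro a ha b hb2
                simp only [List.mem_singleton] at hb2; subst hb2
                obtain ⟨x, y⟩ := hpos a ha
                simp only []
                omega)
            (by have hfc := flush_corr pos bl bs nt rs hb hnt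
                rw [← hfc]
                by_cases h : nt > bl <;> simp [h, hnt])
        refine ⟨pos', si', nt', bl', bs', rsf, ?_, ?_, hh0, ?_, hh2, ?_, hhpw, hhb⟩
        · rw [show pvALoop (t :: rest) idx newT pos si nt =
              pvALoop rest (idx + 1) (newT ++ [t]) (pos ++ [(nt, rs)]) none 0 from by
            simp [pvALoop, ht, hnt, hsi]]
          rw [hA]; simp
        · by_cases hc : nt > bl
          · rw [show pvBLoop (t :: rest) idx bl bs nt rs =
                pvBLoop rest (idx + 1) nt rs 0 rs from by
              simp [pvBLoop, ht, hnt, hc]]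
            simp only [if_pos hc] at hB
            exact hB
          · rw [show pvBLoop (t :: rest) idx bl bs nt rs =
                pvBLoop rest (idx + 1) bl bs 0 rs from by
              have hno : ¬ (nt > 1 ∧ nt > bl) := by tauto
              simp [pvBLoop, ht, hno]]
            simp only [if_neg hc] at hB
            exact hB
        · intro h; obtain ⟨x, y⟩ := hh1 h
          refine ⟨x, ?_⟩
          simp only [List.length_cons]; push_cast; omega
        · intro p hp; obtain ⟨x, y⟩ := hhpos p hp
          refine ⟨x, ?_⟩
          simp only [List.length_cons]; push_cast; omega
      · -- run too short: discard
        obtain ⟨pos', si', nt', bl', bs', rsf, hA, hB, hh0, hh1, hh2, hhpos, hhpw, hhb⟩ :=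
          ih (idx + 1) (newT ++ [t]) pos none 0 bl bs rs (by omega)
            (by intro h; omega)
            (by intro _; rfl)
            (by intro p hp; obtain ⟨x, y⟩ := hpos p hp; exact ⟨x, by omega⟩)
            hpw hb
        refine ⟨pos', si', nt', bl', bs', rsf, ?_, ?_, hh0, ?_, hh2, ?_, hhpw, hhb⟩
        · rw [show pvALoop (t :: rest) idx newT pos si nt =
              pvALoop rest (idx + 1) (newT ++ [t]) pos none 0 from by
            simp [pvALoop, ht, hnt]]
          rw [hA]; simp
        · rw [show pvBLoop (t :: rest) idx bl bs nt rs =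
              pvBLoop rest (idx + 1) bl bs 0 rs from by
            have : ¬ (nt > 1 ∧ nt > bl) := by omega
            simp [pvBLoop, ht, this]]
          rw [hB]
        · intro h; obtain ⟨x, y⟩ := hh1 h
          refine ⟨x, ?_⟩
          simp only [List.length_cons]; push_cast; omega
        · intro p hp; obtain ⟨x, y⟩ := hhpos p hp
          refine ⟨x, ?_⟩
          simp only [List.length_cons]; push_cast; omega

-- after the loops: A's sort + selection = B's tracked best
theorem finish_corr (tokens : List String) (pos : List (Int × Int))
    (hpos : ∀ p ∈ pos, 1 < p.1)
    (hpw : List.Pairwise (fun a b => a.2 < b.2) pos) :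
    pvAFinish tokens pos = pvBFinish tokens (pos.foldl pvASel (0, 0)) := by
  cases pos with
  | nil => simp [pvAFinish, pvBFinish]
  | cons q qs =>
    have hq : 1 < q.1 := (hpos q (by simp))
    have hsorted : PySem.List.sorted (q :: qs) (fun x => x.2) false = q :: qs :=
      PySem.List.sorted_eq_self_of_pairwise _ _ (hpw.imp le_of_lt)
    have hfold : (q :: qs).foldl pvASel q = (q :: qs).foldl pvASel (0, 0) := by
      rw [foldl_pvASel_self, foldl_pvASel_zero _ _ (by omega)]
    have hbig : 1 < ((q :: qs).foldl pvASel (0, 0)).1 := by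
      rw [foldl_pvASel_zero _ _ (by omega)]
      exact lt_of_lt_of_le hq (foldl_pvASel_fst_le qs q)
    unfold pvAFinish pvBFinish
    rw [if_pos (by simp)]
    rw [if_neg (by omega)]
    simp only [hsorted, hfold]
    simp [PySem.List.slice_zero_start]

-- ===== VERDICT (by name: the statement is the Claim_ definition above) =====
theorem ipv6_tokens_handler_spec : Claim_equal_ipv6_tokens_handler := by
  intro tokens _
  unfold Spec_ipv6_tokens_handler ipv6_tokens_handler ipv6_tokens_handler_alt
  obtain ⟨pos', si', nt', bl', bs', rs', hA, hB, h0, h1, h2, hpos, hpw, hb⟩ :=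
    loop_corr tokens 0 [] [] none 0 0 0 0 le_rfl (by omega) (fun _ => rfl)
      (by intro p hp; simp at hp) List.Pairwise.nil rfl
  rw [hA, hB]
  simp only [List.nil_append]
  by_cases hn : nt' > 1
  · obtain ⟨hsi, hrs⟩ := h1 (by omega)
    rw [if_pos hn, hsi]
    have : (Option.some rs').getD 0 = rs' := rfl
    rw [this]
    rw [finish_corr tokens (pos' ++ [(nt', rs')])
      (by intro p hp
          rcases List.mem_append.mp hp with h | h
          · exact (hpos p h).1
          · simp only [List.mem_singleton] at h; subst h; simpa using hn)
      (by rw [List.pairwise_append]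
          refine ⟨hpw, List.pairwise_singleton _ _, ?_⟩
          intro a ha b hb2
          simp only [List.mem_singleton] at hb2; subst hb2
          obtain ⟨x, y⟩ := hpos a ha
          simp only []
          omega)]
    rw [← flush_corr pos' bl' bs' nt' rs' hb hn]
  · have hfalse : ¬ (nt' > 1 ∧ nt' > bl') := by omega
    rw [if_neg hn, if_neg hfalse]
    rw [finish_corr tokens pos' (fun p hp => (hpos p hp).1) hpw, ← hb]
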